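-- pv_equiv track=rewrite | github.com/fly-ghost/R-distillation | reinforcement.py | get_test_list
-- ===== SOURCE A (Python) =====
-- def get_test_list(test):
--     # 对test函数进行分解, 得到多个test
--     lines = test.split("\n")
--     # 从开始到函数定义, 甚至到第一个assert之前的部分都要
--     j = 0
--     while j < len(lines):
--         if lines[j].strip().startswith("assert"):
--             break
--         j = j + 1
--     if j >= len(lines):
--         return [test]
--     function_before = "\n".join(lines[:j])
--     test_list = []
--     # assert之前可能有一些变量的定义, 所以直到下一个assert之前都要加上
--     start_line = j
--     for i in range(j, len(lines)):
--         if lines[i].strip().startswith("assert"):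
--             test_list.append(function_before + "\n" + "\n".join(lines[start_line:i+1]) + "\n")
--             start_line = i + 1
--     return test_list
-- ===== SOURCE B (Python) =====
-- def get_test_list(test):
--     # Single reverse pass: walk the lines back-to-front, growing the current
--     # snippet segment and closing it whenever an assert line is met; the header
--     # falls out as the non-assert prefix left attached to the first segment.
--     lines = test.split("\n")
--     segs = []
--     cur = None
--     for l in reversed(lines):
--         if l.strip().startswith("assert"):
--             if cur is not None:
--                 segs.append(cur)
--             cur = [l]
--         elif cur is not None:
--             cur = [l] + cur
--     if cur is None:
--         return [test]
--     head = "\n".join(cur[:-1])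
--     segs.reverse()
--     return [head + "\n" + cur[-1] + "\n"] + \
--         [head + "\n" + "\n".join(s) + "\n" for s in segs]
-- ===== Notes on version B (the rewrite author's own statement) =====
-- stated objective: alternative
-- what changed: A searches forward for the first assert and then slices snippets out of the line list with a carried start index; B makes a single reverse traversal that accumulates segment lists back-to-front, closing a segment at each assert line, and recovers the header from the last accumulated segment instead of slicing at a found index.
import Mathlib
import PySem

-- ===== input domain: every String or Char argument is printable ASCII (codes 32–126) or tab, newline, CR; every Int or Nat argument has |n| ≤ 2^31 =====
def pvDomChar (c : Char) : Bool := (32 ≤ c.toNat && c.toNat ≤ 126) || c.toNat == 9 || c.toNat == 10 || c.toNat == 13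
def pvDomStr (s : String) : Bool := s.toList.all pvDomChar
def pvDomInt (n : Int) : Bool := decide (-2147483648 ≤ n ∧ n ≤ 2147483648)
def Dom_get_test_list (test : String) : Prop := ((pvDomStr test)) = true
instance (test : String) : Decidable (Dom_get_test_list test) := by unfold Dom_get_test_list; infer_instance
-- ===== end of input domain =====

-- B replaces A's find-first-assert-then-slice-forward scan with a single reverse traversal
-- that grows line segments back-to-front and closes one at each assert, the header falling
-- out of the last accumulated segment (objective: alternative decomposition, same cost).

-- shared helper: l.strip().startswith("assert")
def pvPred (l : String) : Bool := PySem.Str.startswith (PySem.Str.strip l) "assert"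

-- ===== PORT A =====
-- the 'while' loop advancing j until an assert line (returns len(lines) if none)
def pvFindJ : List String → Nat
  | [] => 0
  | l :: ls => if pvPred l then 0 else pvFindJ ls + 1

def get_test_list (test : String) : List String :=
  -- test.split("\n"): sep ≠ "", so split? is always some; the getD default never fires
  let lines := (PySem.Str.split? test "\n").getD []
  let j := pvFindJ lines
  if j ≥ lines.length then [test]
  else
    let function_before := PySem.Str.join "\n" (PySem.List.slice lines none (some (j : Int)))
    -- lines[i] is always in range here (j ≤ i < len), so pyGetD is exact
    ((PySem.List.pyRange (j : Int) (lines.length : Int) 1).foldl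
      (fun (st : List String × Int) i =>
        if pvPred (PySem.List.pyGetD lines i "") then
          (st.1 ++ [function_before ++ "\n" ++
            PySem.Str.join "\n" (PySem.List.slice lines (some st.2) (some (i + 1))) ++ "\n"],
           i + 1)
        else st)
      ([], (j : Int))).1

-- ===== PORT B =====
-- the body of B's reverse loop: state = (closed segments, current open segment or None)
def pvStep (st : List (List String) × Option (List String)) (l : String) :
    List (List String) × Option (List String) :=
  if pvPred l then
    ((match st.2 with | none => st.1 | some c => st.1 ++ [c]), some [l])
  else
    match st.2 with
    | none => st
    | some c => (st.1, some (l :: c))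

def get_test_list_alt (test : String) : List String :=
  let lines := (PySem.Str.split? test "\n").getD []
  let st := lines.reverse.foldl pvStep ([], none)
  match st.2 with
  | none => [test]
  | some c =>
    -- cur is nonempty whenever it is not None, so cur[-1] is exact via pyGetD
    let head := PySem.Str.join "\n" (PySem.List.slice c none (some (-1)))
    (head ++ "\n" ++ PySem.List.pyGetD c (-1) "" ++ "\n") ::
      st.1.reverse.map (fun s => head ++ "\n" ++ PySem.Str.join "\n" s ++ "\n")

-- ===== PRECONDITION & SPEC =====
def Spec_get_test_list (test : String) (out : List String) : Prop := out = get_test_list_alt test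
instance (test : String) (out : List String) : Decidable (Spec_get_test_list test out) := by unfold Spec_get_test_list; infer_instance

-- ===== CLAIM (what is proved, stated in full; the proofs are below) =====
def Claim_equal_get_test_list : Prop := ∀ (test : String), Dom_get_test_list test → Spec_get_test_list test (get_test_list test)

-- ===== LEMMAS AND PROOFS =====

-- the assert-line indices of a list of lines, as naturals
def pvNatIdx (ls : List String) : List Nat :=
  (List.range ls.length).filter (fun k => pvPred (ls.getD k ""))

-- the segments cut at the given (increasing) indices, each ending at its index
def pvChunksN : Nat → List Nat → List String → List (List String)
  | _, [], _ => []
  | lo, i :: is, ls => ((ls.drop lo).take (i + 1 - lo)) :: pvChunksN (i + 1) is ls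

-- structural recursion computing the same segments (B's view)
def pvSegs : List String → List (List String)
  | [] => []
  | l :: ls =>
    if pvPred l then [l] :: pvSegs ls
    else match pvSegs ls with | [] => [] | c :: cc => (l :: c) :: cc

-- the snippet strings cut at the given Int indices with a running lower bound (A's view)
def pvChunksG (g : Int → Int → String) : Int → List Int → List String
  | _, [] => []
  | lo, i :: is => g lo i :: pvChunksG g (i + 1) is

-- common normal form both ports are reduced to
def pvCanon (test : String) : List String :=
  let lines := (PySem.Str.split? test "\n").getD []
  match pvChunksN 0 (pvNatIdx lines) lines with
  | [] => [test]
  | c :: cs =>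
    (PySem.Str.join "\n" c.dropLast ++ "\n" ++ c.getLastD "" ++ "\n") ::
      cs.map (fun s => PySem.Str.join "\n" c.dropLast ++ "\n" ++ PySem.Str.join "\n" s ++ "\n")

lemma pvGetD_neg_one (xs : List String) (d : String) :
    PySem.List.pyGetD xs (-1) d = xs.getLastD d := by
  cases xs with
  | nil => simp [PySem.List.pyGetD, PySem.List.pyGet?, PySem.List.pyIdx?]
  | cons x xs =>
    simp [PySem.List.pyGetD, PySem.List.pyGet?, PySem.List.pyIdx?, List.getLast?_eq_getElem?,
      List.getLastD_eq_getLast?]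

-- no assert line strictly before pvFindJ
lemma pvFindJ_lt_false : ∀ (ls : List String) (k : Nat), k < pvFindJ ls →
    pvPred (ls.getD k "") = false := by
  intro ls
  induction ls with
  | nil => intro k h; simp [pvFindJ] at h
  | cons l ls ih =>
    intro k h
    by_cases hp : pvPred l
    · simp [pvFindJ, hp] at h
    · cases k with
      | zero => simpa using hp
      | succ k =>
        simp [pvFindJ, hp] at h
        simpa using ih k h

lemma pvFindJ_le_length (ls : List String) : pvFindJ ls ≤ ls.length := by
  induction ls with
  | nil => simp [pvFindJ]
  | cons l ls ih => by_cases hp : pvPred l <;> simp [pvFindJ, hp] <;> omega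

lemma pvFindJ_hit : ∀ (ls : List String), pvFindJ ls < ls.length →
    pvPred (ls.getD (pvFindJ ls) "") = true := by
  intro ls
  induction ls with
  | nil => intro h; simp [pvFindJ] at h
  | cons l ls ih =>
    intro h
    by_cases hp : pvPred l
    · simpa [pvFindJ, hp] using hp
    · simp [pvFindJ, hp] at h ⊢
      exact ih h

-- A's fold carrying start_line equals the running-lower-bound chunk recursion
lemma pvChunkFold (g : Int → Int → String) : ∀ (is : List Int) (acc : List String) (s : Int),
    (is.foldl (fun (st : List String × Int) i => (st.1 ++ [g st.2 i], i + 1)) (acc, s)).1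
      = acc ++ pvChunksG g s is := by
  intro is
  induction is with
  | nil => simp [pvChunksG]
  | cons i is ih =>
    intro acc s
    simp only [List.foldl_cons]
    rw [ih]
    simp [pvChunksG]

-- pvNatIdx cast to Int is the filtered pyRange
lemma pvIdx0 (ls : List String) :
    (pvNatIdx ls).map (Nat.cast : Nat → Int)
      = (PySem.List.pyRange 0 (ls.length : Int) 1).filter
          (fun i => pvPred (PySem.List.pyGetD ls i "")) := by
  rw [PySem.List.pyRange_zero_nat, List.filter_map]
  unfold pvNatIdx
  refine congrArg (List.map _) (List.filter_congr ?_)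
  intro k _
  simp [Function.comp, PySem.List.pyGetD_natCast, List.getD_eq_getElem?_getD]

-- nothing before pvFindJ passes the filter, so the range may start at pvFindJ
lemma pvFilter_drop (lines : List String) :
    (PySem.List.pyRange 0 (lines.length : Int) 1).filter
        (fun i => pvPred (PySem.List.pyGetD lines i ""))
      = (PySem.List.pyRange ((pvFindJ lines : Nat) : Int) (lines.length : Int) 1).filter
          (fun i => pvPred (PySem.List.pyGetD lines i "")) := by
  rw [PySem.List.pyRange_one_append 0 ((pvFindJ lines : Nat) : Int) (lines.length : Int)
    (by omega) (by exact_mod_cast pvFindJ_le_length lines)]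
  rw [List.filter_append]
  have h : (PySem.List.pyRange 0 ((pvFindJ lines : Nat) : Int) 1).filter
      (fun i => pvPred (PySem.List.pyGetD lines i "")) = [] := by
    rw [List.filter_eq_nil_iff]
    intro i hi
    rw [PySem.List.mem_pyRange_one] at hi
    have h0 : (0:Int) ≤ i := hi.1
    have hlt : i.toNat < pvFindJ lines := by omega
    rw [show i = ((i.toNat : Nat) : Int) from (Int.toNat_of_nonneg h0).symm,
      PySem.List.pyGetD_natCast]
    simpa [List.getD_eq_getElem?_getD] using pvFindJ_lt_false lines i.toNat hlt
  rw [h, List.nil_append]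

lemma pvChunksN_shift : ∀ (is : List Nat) (lo : Nat) (l : String) (ls : List String),
    pvChunksN (lo + 1) (is.map Nat.succ) (l :: ls) = pvChunksN lo is ls := by
  intro is
  induction is with
  | nil => intro lo l ls; simp [pvChunksN]
  | cons i is ih =>
    intro lo l ls
    simp only [List.map_cons, pvChunksN, List.drop_succ_cons]
    have h1 : i.succ + 1 - (lo + 1) = i + 1 - lo := by omega
    rw [h1, show i.succ + 1 = (i + 1) + 1 from rfl, ih (i + 1) l ls]

lemma pvNatIdx_cons (l : String) (ls : List String) :
    pvNatIdx (l :: ls) = (if pvPred l then [0] else []) ++ (pvNatIdx ls).map Nat.succ := by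
  unfold pvNatIdx
  rw [List.length_cons, List.range_succ_eq_map, List.filter_cons, List.filter_map]
  have hpr : (List.filter ((fun k => pvPred ((l :: ls).getD k "")) ∘ Nat.succ) (List.range ls.length))
      = List.filter (fun k => pvPred (ls.getD k "")) (List.range ls.length) := by
    apply List.filter_congr
    intro k _
    simp [List.getD_cons_succ]
  rw [hpr]
  by_cases hp : pvPred l <;> simp [hp, List.getD]

lemma pvSegs_eq_chunks : ∀ (ls : List String), pvSegs ls = pvChunksN 0 (pvNatIdx ls) ls := by
  intro ls
  induction ls with
  | nil => simp [pvSegs, pvNatIdx, pvChunksN]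
  | cons l ls ih =>
    rw [pvNatIdx_cons]
    by_cases hp : pvPred l
    · simp only [pvSegs, hp, if_pos, List.singleton_append, pvChunksN, List.drop_zero,
        Nat.sub_zero, List.take_succ_cons, List.take_zero]
      rw [pvChunksN_shift]
      simp [ih]
    · simp only [pvSegs, hp, if_false, List.nil_append, Bool.false_eq_true]
      cases hN : pvNatIdx ls with
      | nil => rw [ih, hN]; simp [pvChunksN]
      | cons i is =>
        rw [ih, hN]
        simp only [List.map_cons, pvChunksN, List.drop_zero, Nat.sub_zero]
        rw [show i.succ + 1 = (i + 1) + 1 from rfl, pvChunksN_shift]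
        have ht : List.take (i.succ + 1) (l :: ls) = l :: List.take (i + 1) ls := by
          rw [List.take_succ_cons]
        rw [ht]

-- the invariant of B's reverse loop, stated as a foldr
lemma pvFoldSegs : ∀ (ls : List String),
    ls.foldr (fun l st => pvStep st l) ([], none)
      = ((pvSegs ls).tail.reverse, (pvSegs ls).head?) := by
  intro ls
  induction ls with
  | nil => simp [pvSegs]
  | cons l ls ih =>
    rw [List.foldr_cons, ih]
    by_cases hp : pvPred l
    · simp only [pvStep, hp, if_pos, pvSegs, if_true]
      cases hS : pvSegs ls with
      | nil => simp
      | cons c cc => simp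
    · simp only [pvStep, hp, if_false, pvSegs, Bool.false_eq_true]
      cases hS : pvSegs ls with
      | nil => simp
      | cons c cc => simp

-- the Int-level chunk strings are the Nat-level chunks rendered
lemma pvChunksG_cast (ls : List String) (hd : String) : ∀ (is : List Nat) (lo : Nat),
    pvChunksG (fun lo i => hd ++ "\n" ++
        PySem.Str.join "\n" (PySem.List.slice ls (some lo) (some (i + 1))) ++ "\n")
      ((lo : Nat) : Int) (is.map (Nat.cast : Nat → Int))
      = (pvChunksN lo is ls).map (fun s => hd ++ "\n" ++ PySem.Str.join "\n" s ++ "\n") := by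
  intro is
  induction is with
  | nil => intro lo; simp [pvChunksG, pvChunksN]
  | cons i is ih =>
    intro lo
    simp only [List.map_cons, pvChunksG, pvChunksN]
    have hc : ((i : Nat) : Int) + 1 = (((i + 1 : Nat)) : Int) := by push_cast; ring
    rw [hc, PySem.List.slice_natCast, ih (i + 1)]

set_option maxHeartbeats 1000000 in
lemma pvLemA (test : String) : get_test_list test = pvCanon test := by
  simp only [get_test_list, pvCanon]
  set lines := (PySem.Str.split? test "\n").getD [] with hl
  clear_value lines
  set j := pvFindJ lines with hjdef
  by_cases hj : j ≥ lines.length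
  · have hidx : pvNatIdx lines = [] := by
      rw [pvNatIdx, List.filter_eq_nil_iff]
      intro k hk
      rw [List.mem_range] at hk
      simpa using pvFindJ_lt_false lines k (by omega)
    rw [hidx]
    simp [hj, pvChunksN]
  · push_neg at hj
    -- the Int index list is j followed by the asserts after j
    have hIdxInt : (pvNatIdx lines).map (Nat.cast : Nat → Int)
        = ((j : Nat) : Int) :: (PySem.List.pyRange (((j : Nat) : Int) + 1) (lines.length : Int) 1).filter
            (fun i => pvPred (PySem.List.pyGetD lines i "")) := by
      rw [pvIdx0, pvFilter_drop,
        PySem.List.pyRange_one_cons (a := ((j : Nat) : Int)) (by exact_mod_cast hj)]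
      rw [List.filter_cons_of_pos]
      have hPj : pvPred (PySem.List.pyGetD lines ((j : Nat) : Int) "") = true := by
        rw [PySem.List.pyGetD_natCast, List.getD_eq_getElem?_getD]
        simpa [List.getD_eq_getElem?_getD] using pvFindJ_hit lines (by rw [← hjdef]; exact hj)
      simpa using hPj
    obtain ⟨N', hN⟩ : ∃ N', pvNatIdx lines = j :: N' := by
      cases hNI : pvNatIdx lines with
      | nil => rw [hNI] at hIdxInt; simp at hIdxInt
      | cons n0 N' =>
        rw [hNI] at hIdxInt
        simp only [List.map_cons, List.cons.injEq] at hIdxInt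
        refine ⟨N', ?_⟩
        have hn0 : n0 = j := by exact_mod_cast hIdxInt.1
        rw [hn0]
    have hI : (N').map (Nat.cast : Nat → Int)
        = (PySem.List.pyRange (((j : Nat) : Int) + 1) (lines.length : Int) 1).filter
            (fun i => pvPred (PySem.List.pyGetD lines i "")) := by
      rw [hN] at hIdxInt
      simp only [List.map_cons, List.cons.injEq] at hIdxInt
      exact hIdxInt.2
    -- reduce A's fold to pvChunksG over j :: I
    rw [if_neg (Nat.not_le.mpr hj)]
    rw [PySem.List.pyRange_one_cons (a := ((j : Nat) : Int)) (by exact_mod_cast hj)]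
    have hPj : pvPred (PySem.List.pyGetD lines ((j : Nat) : Int) "") = true := by
      rw [PySem.List.pyGetD_natCast, List.getD_eq_getElem?_getD]
      simpa [List.getD_eq_getElem?_getD] using pvFindJ_hit lines (by rw [← hjdef]; exact hj)
    rw [PySem.List.foldl_if_eq_foldl_filter, List.filter_cons_of_pos (by simpa using hPj)]
    have hf := pvChunkFold
      (fun lo i => PySem.Str.join "\n" (PySem.List.slice lines none (some ((j : Nat) : Int))) ++ "\n" ++
        PySem.Str.join "\n" (PySem.List.slice lines (some lo) (some (i + 1))) ++ "\n")
      (((j : Nat) : Int) :: (PySem.List.pyRange (((j : Nat) : Int) + 1) (lines.length : Int) 1).filter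
        (fun i => pvPred (PySem.List.pyGetD lines i "")))
      [] ((j : Nat) : Int)
    simp only [] at hf
    rw [hf, List.nil_append]
    -- reduce the canonical side
    rw [hN]
    simp only [pvChunksN, List.drop_zero, Nat.sub_zero]
    have hx : lines[j]? = some (lines.getD j "") := by
      rw [List.getElem?_eq_getElem hj, List.getD_eq_getElem?_getD, List.getElem?_eq_getElem hj]
      rfl
    have htake : lines.take (j + 1) = lines.take j ++ [lines.getD j ""] := by
      rw [List.take_succ, hx]; rfl
    rw [htake, List.dropLast_concat, List.getLastD_concat]
    -- both heads are join of take j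
    have hhead : PySem.Str.join "\n" (PySem.List.slice lines none (some ((j : Nat) : Int)))
        = PySem.Str.join "\n" (lines.take j) := by
      rw [PySem.List.slice_to_natCast]
    simp only [pvChunksG]
    have hc : ((j : Nat) : Int) + 1 = (((j + 1 : Nat)) : Int) := by push_cast; ring
    have hmid : PySem.Str.join "\n"
        (PySem.List.slice lines (some ((j : Nat) : Int)) (some (((j : Nat) : Int) + 1)))
        = lines.getD j "" := by
      rw [hc, PySem.List.slice_natCast]
      have hdrop : lines.drop j = lines.getD j "" :: lines.drop (j + 1) := by
        rw [List.drop_eq_getElem_cons hj, List.getD_eq_getElem?_getD,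
          List.getElem?_eq_getElem hj]
        rfl
      rw [hdrop]
      simp [PySem.Str.join]
    refine congrArg₂ List.cons ?_ ?_
    · rw [hhead, hmid]
    · rw [← hI, hc]
      simp only [hhead]
      exact pvChunksG_cast lines (PySem.Str.join "\n" (lines.take j)) N' (j + 1)

lemma pvLemB (test : String) : get_test_list_alt test = pvCanon test := by
  simp only [get_test_list_alt, pvCanon]
  set lines := (PySem.Str.split? test "\n").getD [] with hl
  clear_value lines
  rw [show lines.reverse.foldl pvStep ([], none)
        = lines.foldr (fun l st => pvStep st l) ([], none) from List.foldl_reverse .. ,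
    pvFoldSegs, pvSegs_eq_chunks]
  cases hS : pvChunksN 0 (pvNatIdx lines) lines with
  | nil => simp
  | cons c cs =>
    simp only [List.head?_cons, List.tail_cons, List.reverse_reverse]
    rw [pvGetD_neg_one]
    have hsl : PySem.List.slice c none (some (-1)) = c.dropLast := PySem.List.slice_to_neg_one c
    rw [hsl]

-- ===== VERDICT (by name: the statement is the Claim_ definition above) =====
theorem get_test_list_spec : Claim_equal_get_test_list := by
  intro test _
  simp only [Spec_get_test_list]
  rw [pvLemA, pvLemB]
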